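-- pv_equiv track=rewrite | github.com/msys2/msys2-web | app/fetch/source.py | parse_desc
-- ===== SOURCE A (Python) =====
-- def parse_desc(t: str) -> dict[str, list[str]]:
--     d: dict[str, list[str]] = {}
--     cat = None
--     values: list[str] = []
--     for l in t.splitlines():
--         l = l.strip()
--         if cat is None:
--             cat = l
--         elif not l:
--             d[cat] = values
--             cat = None
--             values = []
--         else:
--             values.append(l)
--     if cat is not None:
--         d[cat] = values
--     return d
-- ===== SOURCE B (Python) =====
-- def parse_desc(t: str) -> dict[str, list[str]]:
--     lines = [l.strip() for l in t.splitlines()]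
--     d: dict[str, list[str]] = {}
--     i = 0
--     n = len(lines)
--     while i < n:
--         cat = lines[i]
--         i += 1
--         values: list[str] = []
--         while i < n and lines[i]:
--             values.append(lines[i])
--             i += 1
--         if i < n:
--             i += 1  # skip the blank separator
--         d[cat] = values
--     return d
-- ===== Notes on version B (the rewrite author's own statement) =====
-- stated objective: alternative
-- what changed: Replaces A's flat single-pass state machine (optional open category, accumulator, commit-on-blank) with a nested read-record parser: lines are stripped up front, then an outer loop reads one category line and an inner loop collects its non-blank value lines and skips the blank separator.
import Mathlib
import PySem

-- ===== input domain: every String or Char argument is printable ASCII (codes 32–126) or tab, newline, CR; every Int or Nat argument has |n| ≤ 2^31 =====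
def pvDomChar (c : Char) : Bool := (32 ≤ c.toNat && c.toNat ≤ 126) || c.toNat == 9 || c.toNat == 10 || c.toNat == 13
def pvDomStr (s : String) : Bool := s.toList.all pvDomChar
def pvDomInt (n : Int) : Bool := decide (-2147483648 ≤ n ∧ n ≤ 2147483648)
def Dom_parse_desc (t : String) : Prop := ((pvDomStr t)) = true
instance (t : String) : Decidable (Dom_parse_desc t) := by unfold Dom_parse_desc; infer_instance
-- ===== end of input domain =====

-- B rewrites A's flat one-pass state machine as a nested read-record/read-values parser
-- over the pre-stripped lines (objective: alternative decomposition, same cost).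

-- ===== PORT A =====
-- the loop body of A: state (d, cat, values), one raw line l
def stepA (st : PySem.Dict String (List String) × Option String × List String) (l0 : String) :
    PySem.Dict String (List String) × Option String × List String :=
  let l := PySem.Str.strip l0
  match st with
  | (d, none, values) => (d, some l, values)
  | (d, some cat, values) =>
    if l = "" then (d.insert cat values, none, [])
    else (d, some cat, values ++ [l])

def parse_desc (t : String) : List (String × List String) :=
  let st := (PySem.Str.splitlines t).foldl stepA (PySem.Dict.empty, none, [])
  match st with
  | (d, none, _) => d.items
  | (d, some cat, values) => (d.insert cat values).items

-- ===== PORT B =====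
-- inner while-loop of B: collect successive non-blank lines, then skip one blank if present;
-- returns (values, remaining lines)
def readValues : List String → List String × List String
  | [] => ([], [])
  | l :: rest =>
    if l = "" then ([], rest)
    else
      let p := readValues rest
      (l :: p.1, p.2)

lemma readValues_snd_length (ls : List String) : (readValues ls).2.length ≤ ls.length := by
  induction ls with
  | nil => simp [readValues]
  | cons l rest ih =>
    simp only [readValues]
    split
    · simp
    · simpa using Nat.le_succ_of_le ih

-- outer while-loop of B: read a category line, then its values, store, repeat
def parseRecords : List String → PySem.Dict String (List String) → PySem.Dict String (List String)
  | [], d => d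
  | cat :: rest, d =>
    let p := readValues rest
    parseRecords p.2 (d.insert cat p.1)
  termination_by ls _ => ls.length
  decreasing_by
    exact Nat.lt_succ_of_le (readValues_snd_length rest)

def parse_desc_alt (t : String) : List (String × List String) :=
  (parseRecords ((PySem.Str.splitlines t).map PySem.Str.strip) PySem.Dict.empty).items

-- ===== PRECONDITION & SPEC =====
def Spec_parse_desc (t : String) (out : List (String × List String)) : Prop := out = parse_desc_alt t
instance (t : String) (out : List (String × List String)) : Decidable (Spec_parse_desc t out) := by unfold Spec_parse_desc; infer_instance

-- ===== CLAIM (what is proved, stated in full; the proofs are below) =====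
def Claim_equal_parse_desc : Prop := ∀ (t : String), Dom_parse_desc t → Spec_parse_desc t (parse_desc t)

-- ===== LEMMAS AND PROOFS =====

-- A's end-of-loop commit, as a function of the loop state
def finishA (st : PySem.Dict String (List String) × Option String × List String) :
    PySem.Dict String (List String) :=
  match st with
  | (d, none, _) => d
  | (d, some cat, values) => d.insert cat values

lemma parseRecords_nil (d : PySem.Dict String (List String)) : parseRecords [] d = d := by
  simp [parseRecords]

lemma parseRecords_cons (cat : String) (rest : List String) (d : PySem.Dict String (List String)) :
    parseRecords (cat :: rest) d = parseRecords (readValues rest).2 (d.insert cat (readValues rest).1) := by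
  rw [parseRecords]

lemma AB_main : ∀ (n : ℕ) (ls : List String), ls.length ≤ n →
    ((∀ d, finishA (ls.foldl stepA (d, none, [])) = parseRecords (ls.map PySem.Str.strip) d) ∧
     (∀ (d : PySem.Dict String (List String)) (cat : String) (vs : List String),
        finishA (ls.foldl stepA (d, some cat, vs)) =
          parseRecords (readValues (ls.map PySem.Str.strip)).2
            (d.insert cat (vs ++ (readValues (ls.map PySem.Str.strip)).1)))) := by
  intro n
  induction n with
  | zero =>
    intro ls h
    have : ls = [] := List.eq_nil_of_length_eq_zero (Nat.le_zero.mp h)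
    subst this
    constructor
    · intro d; simp [finishA, parseRecords_nil]
    · intro d cat vs; simp [finishA, readValues, parseRecords_nil]
  | succ n ih =>
    intro ls h
    match ls with
    | [] =>
      constructor
      · intro d; simp [finishA, parseRecords_nil]
      · intro d cat vs; simp [finishA, readValues, parseRecords_nil]
    | l :: rest =>
      obtain ⟨ih1, ih2⟩ := ih rest (by simpa using Nat.succ_le_succ_iff.mp (by simpa using h))
      constructor
      · intro d
        simp only [List.foldl_cons, List.map_cons, stepA]
        rw [ih2 d (PySem.Str.strip l) [], parseRecords_cons]
        simp
      · intro d cat vs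
        simp only [List.foldl_cons, List.map_cons, stepA]
        by_cases hs : PySem.Str.strip l = ""
        · rw [if_pos hs, ih1]
          simp [hs, readValues]
        · rw [if_neg hs, ih2]
          simp [hs, readValues]

-- ===== VERDICT (by name: the statement is the Claim_ definition above) =====
theorem parse_desc_spec : Claim_equal_parse_desc := by
  intro t _
  show parse_desc t = parse_desc_alt t
  obtain ⟨h1, _⟩ := AB_main (PySem.Str.splitlines t).length (PySem.Str.splitlines t) le_rfl
  have hA : parse_desc t =
      (finishA ((PySem.Str.splitlines t).foldl stepA (PySem.Dict.empty, none, []))).items := by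
    unfold parse_desc
    rcases (PySem.Str.splitlines t).foldl stepA (PySem.Dict.empty, none, []) with ⟨d, c, v⟩
    cases c <;> rfl
  rw [hA, h1]
  rfl
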